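-- pv_equiv track=rewrite | github.com/prasadbhatane/Contests | HackerEarth - DSA July/A sorted string/A sorted string.py | solve
-- ===== SOURCE A (Python) =====
-- def solve (n, s):
--     # Write your code here
--     nb = []
--     for letter in s:
--         if letter == 'a':
--             nb.append('1')
--         elif letter == 'b':
--             nb.append('0')
--         elif letter == 'c':
--             nb.append('-1')
--
--     sum = 0
--     count = 0
--     for i in range(len(nb)):
--         sum = int(nb[i])
--         if sum > 0:
--             count += 1
--         for j in range(i+1, len(nb)):
--             sum += int(nb[j])
--             if sum > 0:
--                 count += 1
--
--     return count
-- ===== SOURCE B (Python) =====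
-- def solve(n, s):
--     # One pass: prefix weight p, counter cnt of previously seen prefix values,
--     # less = number of seen prefixes strictly below p; each step counts the
--     # subarrays ending here with positive sum in O(1).
--     cnt = {0: 1}
--     p = 0
--     less = 0
--     count = 0
--     for ch in s:
--         if ch == 'a':
--             less += cnt.get(p, 0)
--             p += 1
--         elif ch == 'c':
--             p -= 1
--             less -= cnt.get(p, 0)
--         elif ch != 'b':
--             continue
--         count += less
--         cnt[p] = cnt.get(p, 0) + 1
--     return count
-- ===== Notes on version B (the rewrite author's own statement) =====
-- stated objective: faster
-- what changed: Replaced the quadratic all-pairs rescan by a single pass that maintains the running prefix weight, a counter of previously seen prefix values and the number of seen prefixes strictly below the current one, updated in O(1) per character because each step changes the prefix by at most 1.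
import Mathlib
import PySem

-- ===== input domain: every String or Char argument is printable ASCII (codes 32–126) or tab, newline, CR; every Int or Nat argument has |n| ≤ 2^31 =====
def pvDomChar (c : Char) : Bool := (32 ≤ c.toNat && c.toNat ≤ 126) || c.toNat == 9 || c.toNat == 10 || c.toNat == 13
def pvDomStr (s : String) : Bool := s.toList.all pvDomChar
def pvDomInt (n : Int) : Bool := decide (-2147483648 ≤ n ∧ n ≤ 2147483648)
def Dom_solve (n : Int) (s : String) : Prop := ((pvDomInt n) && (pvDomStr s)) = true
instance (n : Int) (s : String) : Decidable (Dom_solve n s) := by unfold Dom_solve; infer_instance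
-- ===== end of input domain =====

-- B replaces A's quadratic all-pairs rescan by a single pass over the string maintaining
-- the running prefix weight, a counter of seen prefix values and the number of seen
-- prefixes below the current one (O(1) per character).

-- ===== PORT A =====
-- int(x) on the strings A stores ("1", "0", "-1"), which always parse
def pyInt (x : String) : Int := (PySem.Int.ofStr? x).getD 0

def aNb (s : String) : List String :=
  s.toList.foldl (fun nb letter =>
    if letter = 'a' then nb ++ ["1"]
    else if letter = 'b' then nb ++ ["0"]
    else if letter = 'c' then nb ++ ["-1"]
    else nb) []

def solve (n : Int) (s : String) : Int :=
  let nb := aNb s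
  (List.range nb.length).foldl (fun count i =>
    let sum := pyInt (nb.getD i "")
    let count := if sum > 0 then count + 1 else count
    ((List.range' (i+1) (nb.length - (i+1))).foldl (fun (sc : Int × Int) j =>
        let sum := sc.1 + pyInt (nb.getD j "")
        (sum, if sum > 0 then sc.2 + 1 else sc.2)) (sum, count)).2) 0

-- ===== PORT B =====
-- the code shared by the 'a'/'b'/'c' branches after the if/elif chain:
-- count += less; cnt[p] = cnt.get(p, 0) + 1
def bStep (cnt : PySem.Dict Int Int) (p less count : Int) :
    PySem.Dict Int Int × Int × Int × Int :=
  (cnt.insert p (cnt.getD p 0 + 1), p, less, count + less)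

def altBody (st : PySem.Dict Int Int × Int × Int × Int) (ch : Char) :
    PySem.Dict Int Int × Int × Int × Int :=
  let (cnt, p, less, count) := st
  if ch = 'a' then
    let less := less + cnt.getD p 0
    let p := p + 1
    bStep cnt p less count
  else if ch = 'c' then
    let p := p - 1
    let less := less - cnt.getD p 0
    bStep cnt p less count
  else if ch = 'b' then
    bStep cnt p less count
  else st

def solve_alt (n : Int) (s : String) : Int :=
  (s.toList.foldl altBody (PySem.Dict.empty.insert 0 1, 0, 0, 0)).2.2.2

-- ===== PRECONDITION & SPEC =====
def Spec_solve (n : Int) (s : String) (out : Int) : Prop := out = solve_alt n s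
instance (n : Int) (s : String) (out : Int) : Decidable (Spec_solve n s out) := by unfold Spec_solve; infer_instance

-- ===== CLAIM (what is proved, stated in full; the proofs are below) =====
def Claim_equal_solve : Prop := ∀ (n : Int) (s : String), Dom_solve n s → Spec_solve n s (solve n s)

-- ===== LEMMAS AND PROOFS =====

-- weight of a letter ('a' = 1, 'b' = 0, 'c' = -1, anything else dropped)
def wt (c : Char) : Option Int :=
  if c = 'a' then some 1 else if c = 'b' then some 0 else if c = 'c' then some (-1) else none

def toS (x : Int) : String := if x = 1 then "1" else if x = 0 then "0" else "-1"

-- number of pairs i < j with P_i < P_j in a list of prefix sums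
def pc : List Int → Int
  | [] => 0
  | x :: xs => (xs.countP (fun y => x < y) : Int) + pc xs

lemma aNb_eq (l : List Char) (acc : List String) :
    l.foldl (fun nb letter =>
      if letter = 'a' then nb ++ ["1"]
      else if letter = 'b' then nb ++ ["0"]
      else if letter = 'c' then nb ++ ["-1"]
      else nb) acc = acc ++ (l.filterMap wt).map toS := by
  induction l generalizing acc with
  | nil => simp
  | cons c t ih =>
    by_cases h1 : c = 'a'
    · simp [h1, ih, wt, toS, List.filterMap_cons]
    · by_cases h2 : c = 'b'
      · simp [h1, h2, ih, wt, toS, List.filterMap_cons]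
      · by_cases h3 : c = 'c'
        · simp [h1, h2, h3, ih, wt, toS, List.filterMap_cons]
        · simp [h1, h2, h3, ih, wt, List.filterMap_cons]

lemma mem_wt {l : List Char} {x : Int} (h : x ∈ l.filterMap wt) : x = 1 ∨ x = 0 ∨ x = -1 := by
  rcases List.mem_filterMap.1 h with ⟨c, _, hc⟩
  unfold wt at hc
  split_ifs at hc <;> simp_all

lemma pyInt_toS {x : Int} (h : x = 1 ∨ x = 0 ∨ x = -1) : pyInt (toS x) = x := by
  rcases h with h | h | h <;> subst h <;> decide

lemma getD_map_toS {w : List Int} {j : Nat} (hj : j < w.length)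
    (hall : ∀ x ∈ w, x = 1 ∨ x = 0 ∨ x = -1) :
    pyInt ((w.map toS).getD j "") = w.getD j 0 := by
  have h1 : (w.map toS).getD j "" = toS w[j] := by
    simp [List.getD, List.getElem?_eq_getElem, hj]
  have h2 : w.getD j 0 = w[j] := by
    simp [List.getD, List.getElem?_eq_getElem, hj]
  rw [h1, h2, pyInt_toS (hall _ (List.getElem_mem hj))]

lemma pyInt_getD (w : List Int) (hall : ∀ x ∈ w, x = 1 ∨ x = 0 ∨ x = -1) (j : Nat) :
    pyInt ((w.map toS).getD j "") = w.getD j 0 := by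
  by_cases hj : j < w.length
  · exact getD_map_toS hj hall
  · rw [List.getD_eq_default _ _ (by simpa using hj), List.getD_eq_default _ _ (by omega)]
    decide

lemma foldl_range'_getD {α : Type} (w : List Int) (f : α → Int → α) :
    ∀ (k a : Nat), a + k = w.length → ∀ (init : α),
    (List.range' a k).foldl (fun st j => f st (w.getD j 0)) init = (w.drop a).foldl f init := by
  intro k
  induction k with
  | zero =>
    intro a h init
    simp [List.drop_of_length_le (by omega : w.length ≤ a)]
  | succ k ih =>
    intro a h init
    have ha : a < w.length := by omega
    rw [List.range'_succ, List.drop_eq_getElem_cons ha]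
    simp only [List.foldl_cons]
    rw [ih (a+1) (by omega)]
    congr 1
    simp [List.getD, List.getElem?_eq_getElem, ha]

def aInner (sc : Int × Int) (d : Int) : Int × Int :=
  (sc.1 + d, if sc.1 + d > 0 then sc.2 + 1 else sc.2)

lemma inner_count (t : List Int) : ∀ (s c : Int),
    (t.foldl aInner (s, c)).2
      = c + (((List.scanl (· + ·) s t).tail).countP (fun y => 0 < y) : Int) := by
  induction t with
  | nil => intro s c; simp [List.scanl_nil, List.scanl_cons]
  | cons d t ih =>
    intro s c
    simp only [List.foldl_cons, List.scanl_cons, List.tail_cons, aInner]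
    rw [ih]
    have : List.scanl (· + ·) (s + d) t = (s + d) :: (List.scanl (· + ·) (s + d) t).tail := by
      cases t <;> simp [List.scanl_nil, List.scanl_cons]
    rw [this, List.countP_cons]
    by_cases h : 0 < s + d <;>
      simp [h, gt_iff_lt] <;> push_cast <;> ring

def contrib (w : List Int) (i : Nat) : Int :=
  (if 0 < w.getD i 0 then 1 else 0)
    + (((List.scanl (· + ·) (w.getD i 0) (w.drop (i+1))).tail).countP (fun y => 0 < y) : Int)

lemma scanl_shift (t : List Int) : ∀ c : Int,
    List.scanl (· + ·) c t = (List.scanl (· + ·) 0 t).map (fun y => c + y) := by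
  induction t with
  | nil => intro c; simp [List.scanl_nil, List.scanl_cons]
  | cons x t ih =>
    intro c
    simp only [List.scanl_cons]
    rw [ih (c + x), ih (0 + x)]
    simp [List.map_map, Function.comp]

lemma pc_shift (P : List Int) (c : Int) : pc (P.map (fun y => c + y)) = pc P := by
  induction P with
  | nil => simp [pc]
  | cons x xs ih =>
    simp only [List.map_cons, pc]
    rw [ih]
    congr 2
    rw [List.countP_map]
    apply List.countP_congr
    intro a _
    simp only [Function.comp_apply, decide_eq_true_eq]
    omega

lemma pc_scanl_shift (t : List Int) (c : Int) :
    pc (List.scanl (· + ·) c t) = pc (List.scanl (· + ·) 0 t) := by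
  rw [scanl_shift t c, pc_shift]

lemma sum_contrib (w : List Int) :
    ((List.range w.length).map (contrib w)).sum = pc (List.scanl (· + ·) 0 w) := by
  induction w with
  | nil => simp [pc, List.scanl]
  | cons d t ih =>
    have hlen : (d :: t).length = t.length + 1 := rfl
    rw [hlen, List.range_succ_eq_map]
    simp only [List.map_cons, List.map_map, List.sum_cons]
    have hshift : ((List.range t.length).map (contrib (d :: t) ∘ Nat.succ)).sum
        = ((List.range t.length).map (contrib t)).sum := by
      apply congrArg List.sum
      apply List.map_congr_left
      intro i _
      simp [contrib, Function.comp, List.getD_cons_succ, List.drop_succ_cons]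
    rw [hshift, ih]
    have hhead : contrib (d :: t) 0 = ((List.scanl (· + ·) d t).countP (fun y => 0 < y) : Int) := by
      have : List.scanl (· + ·) d t = d :: (List.scanl (· + ·) d t).tail := by
        cases t <;> simp [List.scanl_nil, List.scanl_cons]
      rw [contrib]
      conv_rhs => rw [this]
      rw [List.countP_cons]
      simp only [List.getD_cons_zero, List.drop_succ_cons, List.drop_zero]
      by_cases h : 0 < d <;> simp [h] <;> push_cast <;> ring
    rw [hhead]
    have : List.scanl (· + ·) 0 (d :: t) = 0 :: List.scanl (· + ·) d t := by
      simp [List.scanl_nil, List.scanl_cons]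
    rw [this]
    simp only [pc]
    rw [pc_scanl_shift t d]

def aBodyW (w : List Int) (count : Int) (i : Nat) : Int :=
  let sum := w.getD i 0
  let count := if sum > 0 then count + 1 else count
  ((List.range' (i+1) (w.length - (i+1))).foldl (fun (sc : Int × Int) j =>
      let s := sc.1 + w.getD j 0
      (s, if s > 0 then sc.2 + 1 else sc.2)) (sum, count)).2

lemma aBodyW_eq_contrib (w : List Int) (count : Int) (i : Nat) (hi : i < w.length) :
    aBodyW w count i = count + contrib w i := by
  show ((List.range' (i+1) (w.length - (i+1))).foldl (fun st j => aInner st (w.getD j 0))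
      (w.getD i 0, if w.getD i 0 > 0 then count + 1 else count)).2 = count + contrib w i
  rw [foldl_range'_getD w aInner (w.length - (i+1)) (i+1) (by omega)]
  rw [inner_count]
  unfold contrib
  split_ifs <;> omega

lemma solve_eq_pc (n : Int) (s : String) :
    solve n s = pc (List.scanl (· + ·) 0 (s.toList.filterMap wt)) := by
  have hall : ∀ x ∈ s.toList.filterMap wt, x = 1 ∨ x = 0 ∨ x = -1 := fun x hx => mem_wt hx
  have hnb : aNb s = (s.toList.filterMap wt).map toS := aNb_eq s.toList []
  set w := s.toList.filterMap wt with hw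
  simp only [solve, hnb, List.length_map, pyInt_getD w hall]
  show (List.range w.length).foldl (fun count i => aBodyW w count i) 0 = pc (List.scanl (· + ·) 0 w)
  have hstep : ∀ (count : Int) (i : Nat), i ∈ List.range w.length →
      aBodyW w count i = count + contrib w i := by
    intro count i hi
    exact aBodyW_eq_contrib w count i (List.mem_range.mp hi)
  rw [PySem.List.foldl_congr_mem (l := List.range w.length)
        (f := fun count i => aBodyW w count i)
        (g := fun count i => count + contrib w i) (init := (0:Int)) hstep]
  rw [PySem.List.foldl_add]
  rw [sum_contrib]
  ring

-- ===== B side =====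

def bodyInt (st : PySem.Dict Int Int × Int × Int × Int) (d : Int) :
    PySem.Dict Int Int × Int × Int × Int :=
  let (cnt, p, less, count) := st
  if d = 1 then bStep cnt (p + 1) (less + cnt.getD p 0) count
  else if d = -1 then bStep cnt (p - 1) (less - cnt.getD (p - 1) 0) count
  else bStep cnt p less count

lemma foldl_altBody_eq (l : List Char) : ∀ st,
    l.foldl altBody st = (l.filterMap wt).foldl bodyInt st := by
  induction l with
  | nil => intro st; simp
  | cons c t ih =>
    intro st
    obtain ⟨cnt, p, less, count⟩ := st
    by_cases h1 : c = 'a'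
    · simp [h1, wt, List.filterMap_cons, altBody, bodyInt, ih]
    · by_cases h2 : c = 'b'
      · simp [h1, h2, wt, List.filterMap_cons, altBody, bodyInt, ih]
      · by_cases h3 : c = 'c'
        · simp [h1, h2, h3, wt, List.filterMap_cons, altBody, bodyInt, ih]
        · simp [h1, h2, h3, wt, List.filterMap_cons, altBody, ih]

lemma countP_lt_succ (l : List Int) (p : Int) :
    l.countP (fun y => y < p + 1) = l.countP (fun y => y < p) + l.count p := by
  induction l with
  | nil => simp
  | cons x t ih =>
    simp only [List.countP_cons, List.count_cons, ih]
    split_ifs <;> simp_all <;> omega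

lemma countP_lt_pred (l : List Int) (p : Int) :
    l.countP (fun y => y < p - 1) + l.count (p - 1) = l.countP (fun y => y < p) := by
  induction l with
  | nil => simp
  | cons x t ih =>
    simp only [List.countP_cons, List.count_cons, ← ih]
    split_ifs <;> simp_all <;> omega

lemma scanl_concat (u : List Int) : ∀ (c d : Int),
    List.scanl (· + ·) c (u ++ [d]) = List.scanl (· + ·) c u ++ [u.foldl (· + ·) c + d] := by
  induction u with
  | nil => intro c d; simp [List.scanl_nil, List.scanl_cons]
  | cons x u ih =>
    intro c d
    simp only [List.cons_append, List.scanl_cons, List.foldl_cons, ih]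

lemma pc_concat (xs : List Int) (q : Int) :
    pc (xs ++ [q]) = pc xs + (xs.countP (fun y => y < q) : Int) := by
  induction xs with
  | nil => simp [pc]
  | cons x t ih =>
    simp only [List.cons_append, pc, ih, List.countP_append, List.countP_cons]
    push_cast
    split_ifs <;> simp_all <;> ring

lemma foldB_inv : ∀ (rest : List Int), (∀ d ∈ rest, d = 1 ∨ d = 0 ∨ d = -1) →
    ∀ (u : List Int) (cnt : PySem.Dict Int Int) (less count : Int),
    (∀ v, cnt.getD v 0 = ((List.scanl (· + ·) 0 u).count v : Int)) →
    less = ((List.scanl (· + ·) 0 u).countP (fun y => y < u.foldl (· + ·) 0) : Int) →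
    count = pc (List.scanl (· + ·) 0 u) →
    (rest.foldl bodyInt (cnt, u.foldl (· + ·) 0, less, count)).2.2.2
      = pc (List.scanl (· + ·) 0 (u ++ rest)) := by
  intro rest
  induction rest with
  | nil =>
    intro _ u cnt less count _ _ hcount
    simpa using hcount
  | cons d rest ih =>
    intro hmem u cnt less count hcnt hless hcount
    have hd := hmem d (by simp)
    have hrest : ∀ x ∈ rest, x = 1 ∨ x = 0 ∨ x = -1 := fun x hx => hmem x (by simp [hx])
    set S := List.scanl (· + ·) 0 u with hS
    set p := u.foldl (· + ·) 0 with hp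
    have hS' : List.scanl (· + ·) 0 (u ++ [d]) = S ++ [p + d] := scanl_concat u 0 d
    have hp' : (u ++ [d]).foldl (· + ·) 0 = p + d := by simp [hp]
    have happ : u ++ d :: rest = (u ++ [d]) ++ rest := by simp
    have key : ∀ less' : Int, less' = (S.countP (fun y => y < p + d) : Int) →
        (rest.foldl bodyInt
          (cnt.insert (p + d) (cnt.getD (p + d) 0 + 1), p + d, less', count + less')).2.2.2
          = pc (List.scanl (· + ·) 0 (u ++ d :: rest)) := by
      intro less' hless'
      have h1 : ∀ v, (cnt.insert (p + d) (cnt.getD (p + d) 0 + 1)).getD v 0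
          = ((List.scanl (· + ·) 0 (u ++ [d])).count v : Int) := by
        intro v
        rw [hS', PySem.Dict.getD_insert, List.count_append]
        by_cases hv : v = p + d
        · subst hv; simp [hcnt]
        · simp [hv, hcnt v, List.count_singleton, Ne.symm hv]
      have h2 : less' = ((List.scanl (· + ·) 0 (u ++ [d])).countP
          (fun y => y < (u ++ [d]).foldl (· + ·) 0) : Int) := by
        rw [hp', hS', List.countP_append]
        simp [hless']
      have h3 : count + less' = pc (List.scanl (· + ·) 0 (u ++ [d])) := by
        rw [hS', pc_concat, hcount, hless']
      have hmain := ih hrest (u ++ [d]) _ _ _ h1 h2 h3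
      rw [hp'] at hmain
      rw [happ]
      exact hmain
    rcases hd with hd | hd | hd <;> subst hd
    · rw [List.foldl_cons]
      have hb : bodyInt (cnt, p, less, count) 1
          = (cnt.insert (p + 1) (cnt.getD (p + 1) 0 + 1), p + 1,
             less + cnt.getD p 0, count + (less + cnt.getD p 0)) := by
        simp [bodyInt, bStep]
      rw [hb]
      apply key
      have hc := countP_lt_succ S p
      rw [hless, hcnt p]
      omega
    · rw [List.foldl_cons]
      have hb : bodyInt (cnt, p, less, count) 0
          = (cnt.insert p (cnt.getD p 0 + 1), p, less, count + less) := by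
        simp [bodyInt, bStep]
      rw [hb]
      have key0 := key less
      simp only [add_zero] at key0
      apply key0
      rw [hless]
    · rw [List.foldl_cons]
      have hb : bodyInt (cnt, p, less, count) (-1)
          = (cnt.insert (p - 1) (cnt.getD (p - 1) 0 + 1), p - 1,
             less - cnt.getD (p - 1) 0, count + (less - cnt.getD (p - 1) 0)) := by
        simp [bodyInt, bStep]
      rw [hb]
      have keym := key (less - cnt.getD (p - 1) 0)
      rw [show p + (-1 : Int) = p - 1 by ring] at keym
      apply keym
      have hc := countP_lt_pred S p
      rw [hless, hcnt (p - 1)]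
      omega

lemma solve_alt_eq_pc (n : Int) (s : String) :
    solve_alt n s = pc (List.scanl (· + ·) 0 (s.toList.filterMap wt)) := by
  have hall : ∀ x ∈ s.toList.filterMap wt, x = 1 ∨ x = 0 ∨ x = -1 := fun x hx => mem_wt hx
  unfold solve_alt
  rw [foldl_altBody_eq]
  have h0 : (0 : Int) = ([] : List Int).foldl (· + ·) 0 := rfl
  have := foldB_inv (s.toList.filterMap wt) hall [] (PySem.Dict.empty.insert 0 1) 0 0
    (by
      intro v
      rw [PySem.Dict.getD_insert]
      by_cases hv : v = 0
      · subst hv; simp [List.scanl_nil, PySem.Dict.getD_empty]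
      · simp [hv, List.scanl_nil, PySem.Dict.getD_empty, List.count_singleton, Ne.symm hv])
    (by simp [List.scanl_nil])
    (by simp [List.scanl_nil, pc])
  simpa using this

-- ===== VERDICT (by name: the statement is the Claim_ definition above) =====
theorem solve_spec : Claim_equal_solve := by
  intro n s _
  unfold Spec_solve
  rw [solve_eq_pc, solve_alt_eq_pc]
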